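-- pv_equiv track=rewrite | github.com/Felix-012/ontology-concept-distillation | knowledge_graph/cost_functions.py | add_synonyms
-- ===== SOURCE A (Python) =====
-- def add_synonyms(reference_cuis: set[str],
--                  target_cuis: set[str],
--                  cui_to_vid: dict[str, int],
--                  vid_to_cui: dict[int, str],
--                  pred_map: dict[int, int],
--                  rel_dict):
--     if not reference_cuis:
--         return reference_cuis
--
--     def edge_rels(a_vid: int, b_vid: int) -> tuple[str, ...]:
--         """Return relations on the edge (a,b), order-agnostic."""
--         a, b = vid_to_cui[a_vid], vid_to_cui[b_vid]
--         return rel_dict.get((a, b)) or rel_dict.get((b, a)) or ()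
--
--     def reaches_target(start_vid: int, relation_code: str) -> bool:
--         """Walk up while every edge contains `relation_code`."""
--         cur = start_vid
--         while True:
--             if vid_to_cui[cur] in target_cuis:
--                 return True
--             parent = pred_map.get(cur, -1)
--             if parent == -1 or relation_code not in edge_rels(parent, cur):
--                 return False
--             cur = parent
--
--     adds = {
--         cui
--         for cui in reference_cuis
--         if (vid := cui_to_vid.get(cui)) is not None
--            and (
--                    reaches_target(vid, "SY")
--                    #or reaches_target(vid, "PAR")
--                    #or reaches_target(vid, "CHD")
--            )
--     }
--
--     return target_cuis | adds
-- ===== SOURCE B (Python) =====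
-- def add_synonyms(reference_cuis: set[str],
--                  target_cuis: set[str],
--                  cui_to_vid: dict[str, int],
--                  vid_to_cui: dict[int, str],
--                  pred_map: dict[int, int],
--                  rel_dict):
--     if not reference_cuis:
--         return reference_cuis
--
--     def sy_edge(p: int, c: int) -> bool:
--         a, b = vid_to_cui[p], vid_to_cui[c]
--         rels = rel_dict.get((a, b))
--         if not rels:
--             rels = rel_dict.get((b, a)) or ()
--         return "SY" in rels
--
--     # All SY parent->child edges of the forest, computed once (-1 is the
--     # no-parent sentinel of pred_map).
--     edges = [(p, c) for c, p in pred_map.items()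
--              if p != -1 and p in vid_to_cui and c in vid_to_cui and sy_edge(p, c)]
--
--     # Propagate SY-reachability DOWN from the target vertices to a fixpoint.
--     reachable = {v for v, cui in vid_to_cui.items() if cui in target_cuis}
--     for _ in range(len(pred_map)):
--         added = False
--         for p, c in edges:
--             if p in reachable and c not in reachable:
--                 reachable.add(c)
--                 added = True
--         if not added:
--             break
--
--     result = set(target_cuis)
--     for cui in reference_cuis:
--         vid = cui_to_vid.get(cui)
--         if vid is not None and vid in reachable:
--             result.add(cui)
--     return result
-- ===== Notes on version B (the rewrite author's own statement) =====
-- stated objective: alternative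
-- what changed: A walks the parent chain upward independently for every reference CUI; B computes the SY edge list once and propagates reachability downward from the target vertices to a fixpoint (seed set + round-based closure with early exit), then answers every reference CUI by one set-membership test, so shared chain suffixes are never re-walked.
import Mathlib
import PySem

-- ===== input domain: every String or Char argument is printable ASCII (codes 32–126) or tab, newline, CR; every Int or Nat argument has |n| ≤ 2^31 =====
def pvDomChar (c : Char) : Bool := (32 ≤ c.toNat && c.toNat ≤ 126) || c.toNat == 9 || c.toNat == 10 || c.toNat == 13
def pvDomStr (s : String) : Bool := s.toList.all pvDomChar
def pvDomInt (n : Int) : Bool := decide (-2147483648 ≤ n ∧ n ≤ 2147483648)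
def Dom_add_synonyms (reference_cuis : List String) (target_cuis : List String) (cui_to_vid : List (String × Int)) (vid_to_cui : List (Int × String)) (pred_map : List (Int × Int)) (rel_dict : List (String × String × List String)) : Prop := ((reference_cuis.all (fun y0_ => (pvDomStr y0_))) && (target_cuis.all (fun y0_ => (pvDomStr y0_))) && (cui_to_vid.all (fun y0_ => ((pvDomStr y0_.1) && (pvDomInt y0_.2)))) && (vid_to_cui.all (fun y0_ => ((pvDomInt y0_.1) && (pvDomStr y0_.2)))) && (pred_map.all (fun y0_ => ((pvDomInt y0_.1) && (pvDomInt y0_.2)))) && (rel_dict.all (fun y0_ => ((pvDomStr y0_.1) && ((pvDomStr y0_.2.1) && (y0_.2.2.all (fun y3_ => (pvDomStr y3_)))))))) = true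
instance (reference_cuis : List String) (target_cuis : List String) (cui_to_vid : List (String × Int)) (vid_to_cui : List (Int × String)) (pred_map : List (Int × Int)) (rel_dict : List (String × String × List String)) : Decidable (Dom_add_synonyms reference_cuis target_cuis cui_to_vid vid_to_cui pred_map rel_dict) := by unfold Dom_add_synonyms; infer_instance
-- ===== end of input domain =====

-- ===== PORT A =====
-- B replaces A's repeated upward per-reference walks by ONE downward fixpoint propagation from the
-- target vertices along the precomputed SY edges; RETURN-value equivalence (neither Python mutates its arguments).
-- A-side helper: edge_rels(a_vid, b_vid) — `rel_dict.get((a,b)) or rel_dict.get((b,a)) or ()` (empty tuples are falsy).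
def pvEdgeRels (vid_to_cui : List (Int × String)) (rel_dict : List (String × String × List String)) (a_vid b_vid : Int) : List String :=
  let rd := PySem.Dict.mk (rel_dict.map (fun t => ((t.1, t.2.1), t.2.2)))
  -- vid_to_cui[a_vid] / vid_to_cui[b_vid] raise KeyError on a missing key; Pre_ excludes that, so getD's default is never seen
  let a := PySem.Dict.getD (PySem.Dict.mk vid_to_cui) a_vid ""
  let b := PySem.Dict.getD (PySem.Dict.mk vid_to_cui) b_vid ""
  match PySem.Dict.get? rd (a, b) with
  | some l => if l = [] then (match PySem.Dict.get? rd (b, a) with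
              | some m => if m = [] then [] else m
              | none => []) else l
  | none => match PySem.Dict.get? rd (b, a) with
            | some m => if m = [] then [] else m
            | none => []

-- A-side helper: reaches_target(start_vid, "SY") — the `while True` loop as fuel recursion; under Pre_ the
-- walk escapes within pred_map.length + 1 moves, so the fuel (pred_map.length + 2 at the call site) is never exhausted.
def pvReachA (target_cuis : List String) (vid_to_cui : List (Int × String)) (pred_map : List (Int × Int)) (rel_dict : List (String × String × List String)) : Nat → Int → Bool
  | 0, _ => false
  | f + 1, cur =>
    if PySem.Dict.getD (PySem.Dict.mk vid_to_cui) cur "" ∈ target_cuis then true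
    else
      let parent := PySem.Dict.getD (PySem.Dict.mk pred_map) cur (-1)
      if parent = -1 ∨ "SY" ∉ pvEdgeRels vid_to_cui rel_dict parent cur then false
      else pvReachA target_cuis vid_to_cui pred_map rel_dict f parent

def add_synonyms (reference_cuis : List String) (target_cuis : List String) (cui_to_vid : List (String × Int)) (vid_to_cui : List (Int × String)) (pred_map : List (Int × Int)) (rel_dict : List (String × String × List String)) : List String :=
  if reference_cuis = [] then reference_cuis
  else
    let adds : List String := reference_cuis.foldl (fun acc cui =>
      match PySem.Dict.get? (PySem.Dict.mk cui_to_vid) cui with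
      | some vid => if pvReachA target_cuis vid_to_cui pred_map rel_dict (pred_map.length + 2) vid = true
                    then PySem.Set.add acc cui else acc
      | none => acc) PySem.Set.empty
    PySem.Set.union target_cuis adds

-- ===== PORT B =====
-- B-side helper: sy_edge(p, c) = '"SY" in (rel_dict.get((a,b)) or rel_dict.get((b,a)) or ())', a and b present under the edge filter
def pvSyEdge (vid_to_cui : List (Int × String)) (rel_dict : List (String × String × List String)) (p c : Int) : Bool :=
  let a := PySem.Dict.getD (PySem.Dict.mk vid_to_cui) p ""
  let b := PySem.Dict.getD (PySem.Dict.mk vid_to_cui) c ""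
  let rd := PySem.Dict.mk (rel_dict.map (fun t => ((t.1, t.2.1), t.2.2)))
  let r1 := (PySem.Dict.get? rd (a, b)).getD []
  let rels := if r1 = [] then (PySem.Dict.get? rd (b, a)).getD [] else r1
  rels.contains "SY"

-- B-side helper: the SY parent->child edge list, computed once (-1 is the no-parent sentinel)
def pvSyEdges (vid_to_cui : List (Int × String)) (pred_map : List (Int × Int)) (rel_dict : List (String × String × List String)) : List (Int × Int) :=
  ((PySem.Dict.mk pred_map).items.filter (fun cp =>
      cp.2 != -1 && PySem.Dict.contains (PySem.Dict.mk vid_to_cui) cp.2 &&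
      PySem.Dict.contains (PySem.Dict.mk vid_to_cui) cp.1 &&
      pvSyEdge vid_to_cui rel_dict cp.2 cp.1)).map (fun cp => (cp.2, cp.1))

-- B-side helper: the initial reachable set — the vertices whose CUI is a target
def pvSeeds (target_cuis : List String) (vid_to_cui : List (Int × String)) : List Int :=
  (((PySem.Dict.mk vid_to_cui).items.filter (fun kv => target_cuis.contains kv.2)).map (fun kv => kv.1))

-- B-side helper: one inner pass over the edges (`for p, c in edges: …` with the `added` flag)
def pvRStep (st : List Int × Bool) (pc : Int × Int) : List Int × Bool :=
  if st.1.contains pc.1 && !st.1.contains pc.2 then (PySem.Set.add st.1 pc.2, true) else st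

def pvRound (edges : List (Int × Int)) (S : List Int) : List Int × Bool :=
  edges.foldl pvRStep (S, false)

-- B-side helper: the outer `for _ in range(len(pred_map))` loop with its `if not added: break`
def pvFix (edges : List (Int × Int)) : Nat → List Int → List Int
  | 0, S => S
  | n + 1, S =>
    let r := pvRound edges S
    if r.2 = false then r.1 else pvFix edges n r.1

def add_synonyms_alt (reference_cuis : List String) (target_cuis : List String) (cui_to_vid : List (String × Int)) (vid_to_cui : List (Int × String)) (pred_map : List (Int × Int)) (rel_dict : List (String × String × List String)) : List String :=
  if reference_cuis = [] then reference_cuis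
  else
    let reachable := pvFix (pvSyEdges vid_to_cui pred_map rel_dict)
      (PySem.Dict.mk pred_map).size (pvSeeds target_cuis vid_to_cui)
    reference_cuis.foldl (fun res cui =>
      match PySem.Dict.get? (PySem.Dict.mk cui_to_vid) cui with
      | some vid => if reachable.contains vid then PySem.Set.add res cui else res
      | none => res) (PySem.Set.ofList target_cuis)

-- ===== PRECONDITION & SPEC =====
-- pvWalkOK n v: A's upward walk from v stops (target hit, no parent, or a non-SY edge — A's exact stopping
-- conditions) within n moves and every vertex it actually touches is a key of vid_to_cui; nothing beyond the
-- stopping point is constrained.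
def pvWalkOK (target_cuis : List String) (vid_to_cui : List (Int × String)) (pred_map : List (Int × Int)) (rel_dict : List (String × String × List String)) : Nat → Int → Bool
  | 0, _ => false
  | n + 1, v =>
    PySem.Dict.contains (PySem.Dict.mk vid_to_cui) v &&
    (if PySem.Dict.getD (PySem.Dict.mk vid_to_cui) v "" ∈ target_cuis then true
     else if PySem.Dict.getD (PySem.Dict.mk pred_map) v (-1) = -1 then true
     else
       PySem.Dict.contains (PySem.Dict.mk vid_to_cui) (PySem.Dict.getD (PySem.Dict.mk pred_map) v (-1)) &&
       (if "SY" ∈ pvEdgeRels vid_to_cui rel_dict (PySem.Dict.getD (PySem.Dict.mk pred_map) v (-1)) v then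
          pvWalkOK target_cuis vid_to_cui pred_map rel_dict n (PySem.Dict.getD (PySem.Dict.mk pred_map) v (-1))
        else true))

def pvRefOK (target_cuis : List String) (cui_to_vid : List (String × Int)) (vid_to_cui : List (Int × String)) (pred_map : List (Int × Int)) (rel_dict : List (String × String × List String)) (cui : String) : Bool :=
  match PySem.Dict.get? (PySem.Dict.mk cui_to_vid) cui with
  | some vid => pvWalkOK target_cuis vid_to_cui pred_map rel_dict (pred_map.length + 2) vid
  | none => true

-- Pre_ excludes exactly (a) the inputs on which A raises KeyError or loops forever — a vertex its walk
-- actually touches missing from vid_to_cui, or an all-SY parent cycle; the walk test uses A's exact stopping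
-- conditions, so no input on which A returns is dropped — and (b) duplicate-key association lists /
-- duplicate set elements, which no Python dict/set input can denote (representation corner).
-- pvWalkOK is necessarily recursive: A's domain is itself 'the while-loop terminates without KeyError',
-- a reachability property of the input maps that no bound/shape formula expresses; pvWalkOK reads only the
-- inputs (never either port's result), and its fuel pred_map.length + 2 is exact — a terminating walk moves
-- through pairwise-distinct pred_map keys, hence at most pred_map.length times.
def Pre_add_synonyms (reference_cuis : List String) (target_cuis : List String) (cui_to_vid : List (String × Int)) (vid_to_cui : List (Int × String)) (pred_map : List (Int × Int)) (rel_dict : List (String × String × List String)) : Prop :=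
  target_cuis.Nodup ∧ (vid_to_cui.map Prod.fst).Nodup ∧ (pred_map.map Prod.fst).Nodup ∧
  reference_cuis.all (pvRefOK target_cuis cui_to_vid vid_to_cui pred_map rel_dict) = true

instance (reference_cuis : List String) (target_cuis : List String) (cui_to_vid : List (String × Int)) (vid_to_cui : List (Int × String)) (pred_map : List (Int × Int)) (rel_dict : List (String × String × List String)) : Decidable (Pre_add_synonyms reference_cuis target_cuis cui_to_vid vid_to_cui pred_map rel_dict) := by unfold Pre_add_synonyms; infer_instance

def pvWitness_add_synonyms : List String × List String × (List (String × Int)) × (List (Int × String)) × (List (Int × Int)) × (List (String × String × List String)) :=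
  (["C1"], ["C2"], [("C1", 0)], [(0, "C1"), (1, "C2")], [(0, 1)], [("C2", "C1", ["SY"])])

def Spec_add_synonyms (reference_cuis : List String) (target_cuis : List String) (cui_to_vid : List (String × Int)) (vid_to_cui : List (Int × String)) (pred_map : List (Int × Int)) (rel_dict : List (String × String × List String)) (out : List String) : Prop := out = add_synonyms_alt reference_cuis target_cuis cui_to_vid vid_to_cui pred_map rel_dict
instance (reference_cuis : List String) (target_cuis : List String) (cui_to_vid : List (String × Int)) (vid_to_cui : List (Int × String)) (pred_map : List (Int × Int)) (rel_dict : List (String × String × List String)) (out : List String) : Decidable (Spec_add_synonyms reference_cuis target_cuis cui_to_vid vid_to_cui pred_map rel_dict out) := by unfold Spec_add_synonyms; infer_instance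

-- ===== CLAIM (what is proved, stated in full; the proofs are below) =====
def Claim_equal_add_synonyms : Prop := ∀ (reference_cuis : List String) (target_cuis : List String) (cui_to_vid : List (String × Int)) (vid_to_cui : List (Int × String)) (pred_map : List (Int × Int)) (rel_dict : List (String × String × List String)), Dom_add_synonyms reference_cuis target_cuis cui_to_vid vid_to_cui pred_map rel_dict → Pre_add_synonyms reference_cuis target_cuis cui_to_vid vid_to_cui pred_map rel_dict → Spec_add_synonyms reference_cuis target_cuis cui_to_vid vid_to_cui pred_map rel_dict (add_synonyms reference_cuis target_cuis cui_to_vid vid_to_cui pred_map rel_dict)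

-- ===== LEMMAS AND PROOFS =====

-- the least SY-reachability predicate B's fixpoint iteration computes
inductive pvReach (seeds : List Int) (edges : List (Int × Int)) : Int → Prop
  | base {v : Int} : v ∈ seeds → pvReach seeds edges v
  | step {p c : Int} : pvReach seeds edges p → (p, c) ∈ edges → pvReach seeds edges c

theorem pvSyEdge_eq (vtc : List (Int × String)) (rd : List (String × String × List String)) (p c : Int) :
    pvSyEdge vtc rd p c = (pvEdgeRels vtc rd p c).contains "SY" := by
  unfold pvSyEdge pvEdgeRels
  cases h1 : PySem.Dict.get? (PySem.Dict.mk (rd.map (fun t => ((t.1, t.2.1), t.2.2))))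
      (PySem.Dict.getD (PySem.Dict.mk vtc) p "", PySem.Dict.getD (PySem.Dict.mk vtc) c "") with
  | none =>
    simp only [h1, Option.getD_none]
    cases h2 : PySem.Dict.get? (PySem.Dict.mk (rd.map (fun t => ((t.1, t.2.1), t.2.2))))
        (PySem.Dict.getD (PySem.Dict.mk vtc) c "", PySem.Dict.getD (PySem.Dict.mk vtc) p "") with
    | none => simp
    | some m => by_cases hm : m = [] <;> simp [hm]
  | some l =>
    by_cases hl : l = []
    · subst hl
      simp only [h1, Option.getD_some]
      cases h2 : PySem.Dict.get? (PySem.Dict.mk (rd.map (fun t => ((t.1, t.2.1), t.2.2))))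
          (PySem.Dict.getD (PySem.Dict.mk vtc) c "", PySem.Dict.getD (PySem.Dict.mk vtc) p "") with
      | none => simp
      | some m => by_cases hm : m = [] <;> simp [hm]
    · simp [h1, hl]

theorem pvRStep_sub (st : List Int × Bool) (pc : Int × Int) : st.1 ⊆ (pvRStep st pc).1 := by
  unfold pvRStep
  split_ifs with h
  · intro x hx; exact (PySem.Set.mem_add _ _ _).mpr (Or.inl hx)
  · exact fun x hx => hx

theorem pvFoldR_sub : ∀ (es : List (Int × Int)) (st : List Int × Bool), st.1 ⊆ (es.foldl pvRStep st).1 := by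
  intro es
  induction es with
  | nil => intro st; simp
  | cons pc es ih =>
    intro st
    exact fun x hx => ih (pvRStep st pc) (pvRStep_sub st pc hx)

theorem pvFoldR_flag : ∀ (es : List (Int × Int)) (st : List Int × Bool), st.2 = true → (es.foldl pvRStep st).2 = true := by
  intro es
  induction es with
  | nil => intro st h; exact h
  | cons pc es ih =>
    intro st h
    refine ih (pvRStep st pc) ?_
    unfold pvRStep
    split_ifs
    · rfl
    · exact h

theorem pvFoldR_false : ∀ (es : List (Int × Int)) (st : List Int × Bool),
    (es.foldl pvRStep st).2 = false →
    (es.foldl pvRStep st).1 = st.1 ∧ st.2 = false ∧ ∀ pc ∈ es, pc.1 ∈ st.1 → pc.2 ∈ st.1 := by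
  intro es
  induction es with
  | nil => intro st h; exact ⟨rfl, by simpa using h, by simp⟩
  | cons pc es ih =>
    intro st h
    simp only [List.foldl_cons] at h
    have hst' : (pvRStep st pc).2 = false := by
      by_contra hb
      have := pvFoldR_flag es (pvRStep st pc) (by revert hb; cases (pvRStep st pc).2 <;> simp)
      rw [this] at h; exact Bool.true_eq_false.mp h
    have hguard : ¬ (st.1.contains pc.1 && !st.1.contains pc.2) = true := by
      intro hg
      unfold pvRStep at hst'
      rw [if_pos hg] at hst'
      exact Bool.true_eq_false.mp hst'
    have hste : pvRStep st pc = st := by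
      unfold pvRStep
      rw [if_neg hguard]
    rw [hste] at h
    obtain ⟨h1, h2, h3⟩ := ih st h
    refine ⟨by simpa [hste] using h1, h2, ?_⟩
    intro qc hqc
    rcases List.mem_cons.mp hqc with rfl | hmem
    · intro hp
      by_contra hc
      apply hguard
      rw [Bool.and_eq_true]
      exact ⟨List.contains_iff_mem.mpr hp, by simp [hc]⟩
    · exact h3 qc hmem

theorem pvFoldR_true : ∀ (es : List (Int × Int)) (S : List Int),
    (es.foldl pvRStep (S, false)).2 = true →
    ∃ c, c ∈ (es.foldl pvRStep (S, false)).1 ∧ c ∉ S ∧ c ∈ es.map Prod.snd := by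
  intro es
  induction es with
  | nil => intro S h; simp at h
  | cons pc es ih =>
    intro S h
    by_cases hg : ((S, false) : List Int × Bool).1.contains pc.1 && !((S, false) : List Int × Bool).1.contains pc.2
    · refine ⟨pc.2, ?_, ?_, by simp⟩
      · have hstep : pvRStep (S, false) pc = (PySem.Set.add S pc.2, true) := by
          unfold pvRStep; rw [if_pos hg]
        simp only [List.foldl_cons, hstep]
        exact pvFoldR_sub es _ ((PySem.Set.mem_add _ _ _).mpr (Or.inr rfl))
      · have := (Bool.and_eq_true _ _).mp hg
        simpa [List.contains_iff_mem] using this.2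
    · have hstep : pvRStep (S, false) pc = (S, false) := by
        unfold pvRStep; rw [if_neg hg]
      simp only [List.foldl_cons, hstep] at h ⊢
      obtain ⟨c, hc1, hc2, hc3⟩ := ih S h
      exact ⟨c, hc1, hc2, by simp [hc3]⟩

theorem pvFoldR_sound (seeds : List Int) (edges : List (Int × Int)) :
    ∀ (es : List (Int × Int)) (st : List Int × Bool),
    (∀ pc ∈ es, pc ∈ edges) → (∀ v ∈ st.1, pvReach seeds edges v) →
    ∀ v ∈ (es.foldl pvRStep st).1, pvReach seeds edges v := by
  intro es
  induction es with
  | nil => intro st _ hin v hv; exact hin v hv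
  | cons pc es ih =>
    intro st hsub hin
    refine ih (pvRStep st pc) (fun q hq => hsub q (List.mem_cons_of_mem _ hq)) ?_
    intro v hv
    unfold pvRStep at hv
    split_ifs at hv with hg
    · rcases (PySem.Set.mem_add _ _ _).mp hv with hv' | rfl
      · exact hin v hv'
      · have hg' := (Bool.and_eq_true _ _).mp hg
        have hp : pc.1 ∈ st.1 := by simpa [List.contains_iff_mem] using hg'.1
        exact pvReach.step (hin pc.1 hp) (by simpa using hsub pc List.mem_cons_self)
    · exact hin v hv

theorem pvFilter_le (K : List Int) : ∀ (S S' : List Int), S ⊆ S' →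
    (K.filter (fun x => !S'.contains x)).length ≤ (K.filter (fun x => !S.contains x)).length := by
  induction K with
  | nil => intro S S' _; simp
  | cons k K ih =>
    intro S S' hss
    by_cases hk : k ∈ S'
    · have hk' : (!S'.contains k) = false := by simp [hk]
      by_cases hk2 : k ∈ S
      · simp only [List.filter_cons, hk', Bool.false_eq_true, if_false,
          show (!S.contains k) = false by simp [hk2], ]
        exact ih S S' hss
      · simp only [List.filter_cons, hk', Bool.false_eq_true, if_false,
          show (!S.contains k) = true by simp [hk2], if_true, List.length_cons]
        exact Nat.le_succ_of_le (ih S S' hss)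
    · have hk2 : k ∉ S := fun h => hk (hss h)
      simp only [List.filter_cons,
        show (!S'.contains k) = true by simp [hk],
        show (!S.contains k) = true by simp [hk2], if_true, List.length_cons]
      exact Nat.succ_le_succ (ih S S' hss)

theorem pvFilter_lt (K : List Int) : ∀ (S S' : List Int) (c : Int), S ⊆ S' → c ∈ K → c ∉ S → c ∈ S' →
    (K.filter (fun x => !S'.contains x)).length < (K.filter (fun x => !S.contains x)).length := by
  induction K with
  | nil => intro S S' c _ hc; simp at hc
  | cons k K ih =>
    intro S S' c hss hcK hcS hcS'
    rcases List.mem_cons.mp hcK with rfl | hcK'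
    · simp only [List.filter_cons,
        show (!S'.contains c) = false by simp [hcS'],
        show (!S.contains c) = true by simp [hcS],
        Bool.false_eq_true, if_false, if_true, List.length_cons]
      exact Nat.lt_succ_of_le (pvFilter_le K S S' hss)
    · have hstep := ih S S' c hss hcK' hcS hcS'
      by_cases hk : k ∈ S'
      · by_cases hk2 : k ∈ S
        · simpa [List.filter_cons, List.contains_iff_mem, hk, hk2] using hstep
        · simp only [List.filter_cons,
            show (!S'.contains k) = false by simp [hk],
            show (!S.contains k) = true by simp [hk2],
            Bool.false_eq_true, if_false, if_true, List.length_cons]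
          exact Nat.lt_succ_of_lt hstep
      · have hk2 : k ∉ S := fun h => hk (hss h)
        simp only [List.filter_cons,
          show (!S'.contains k) = true by simp [hk],
          show (!S.contains k) = true by simp [hk2], if_true, List.length_cons]
        exact Nat.succ_lt_succ hstep

theorem pvRound_eq (edges : List (Int × Int)) (S : List Int) :
    pvRound edges S = edges.foldl pvRStep (S, false) := rfl

def pvMu (edges : List (Int × Int)) (S : List Int) : Nat :=
  (((edges.map Prod.snd).dedup).filter (fun c => !S.contains c)).length

theorem pvFix_sub (edges : List (Int × Int)) : ∀ (n : Nat) (S : List Int), S ⊆ pvFix edges n S := by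
  intro n
  induction n with
  | zero => intro S; simp [pvFix]
  | succ n ih =>
    intro S
    simp only [pvFix, pvRound_eq]
    split_ifs with h
    · exact pvFoldR_sub edges (S, false)
    · exact fun x hx => ih _ (pvFoldR_sub edges (S, false) hx)

theorem pvFix_sound (seeds : List Int) (edges : List (Int × Int)) :
    ∀ (n : Nat) (S : List Int), (∀ v ∈ S, pvReach seeds edges v) →
    ∀ v ∈ pvFix edges n S, pvReach seeds edges v := by
  intro n
  induction n with
  | zero => intro S h; simpa [pvFix] using h
  | succ n ih =>
    intro S h
    simp only [pvFix, pvRound_eq]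
    split_ifs with hfl
    · exact pvFoldR_sound seeds edges edges (S, false) (fun q hq => hq) h
    · exact ih _ (pvFoldR_sound seeds edges edges (S, false) (fun q hq => hq) h)

theorem pvFix_closed (edges : List (Int × Int)) :
    ∀ (n : Nat) (S : List Int), pvMu edges S ≤ n →
    ∀ pc ∈ edges, pc.1 ∈ pvFix edges n S → pc.2 ∈ pvFix edges n S := by
  intro n
  induction n with
  | zero =>
    intro S hmu pc hpc _
    have h0 : pvMu edges S = 0 := Nat.le_zero.mp hmu
    unfold pvMu at h0
    rw [List.length_eq_zero_iff] at h0
    have hK : pc.2 ∈ (edges.map Prod.snd).dedup := List.mem_dedup.mpr (List.mem_map_of_mem hpc)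
    have hnot : ¬ (!S.contains pc.2) = true := by
      intro hb
      have hmf : pc.2 ∈ ((edges.map Prod.snd).dedup).filter (fun c => !S.contains c) :=
        List.mem_filter.mpr ⟨hK, hb⟩
      rw [h0] at hmf
      simp at hmf
    simp only [pvFix]
    have : S.contains pc.2 = true := by
      revert hnot; cases S.contains pc.2 <;> simp
    exact List.contains_iff_mem.mp this
  | succ n ih =>
    intro S hmu pc hpc
    simp only [pvFix]
    split_ifs with hfl
    · obtain ⟨h1, _, h3⟩ := pvFoldR_false edges (S, false) (by rw [← pvRound_eq]; exact hfl)
      rw [pvRound_eq, h1]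
      exact h3 pc hpc
    · have hfl' : (edges.foldl pvRStep (S, false)).2 = true := by
        rw [← pvRound_eq]
        revert hfl; cases (pvRound edges S).2 <;> simp
      obtain ⟨c, hc1, hc2, hc3⟩ := pvFoldR_true edges S hfl'
      have hmu' : pvMu edges (pvRound edges S).1 ≤ n := by
        have hlt := pvFilter_lt ((edges.map Prod.snd).dedup) S (pvRound edges S).1 c
          (by rw [pvRound_eq]; exact pvFoldR_sub edges (S, false))
          (List.mem_dedup.mpr hc3) hc2 (by rw [pvRound_eq]; exact hc1)
        unfold pvMu at hmu ⊢
        omega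
      intro h1
      exact ih _ hmu' pc hpc h1

theorem pvReach_mem (seeds : List Int) (edges : List (Int × Int)) (X : List Int)
    (hcl : ∀ pc ∈ edges, pc.1 ∈ X → pc.2 ∈ X) (hs : seeds ⊆ X) :
    ∀ v, pvReach seeds edges v → v ∈ X := by
  intro v h
  induction h with
  | base hb => exact hs hb
  | step _ he ih => exact hcl _ he ih

-- membership in an SY edge: the defining conditions, both directions
theorem pvSyEdges_mem (vtc : List (Int × String)) (pm : List (Int × Int)) (rd : List (String × String × List String)) (p c : Int) :
    (p, c) ∈ pvSyEdges vtc pm rd ↔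
      ((c, p) ∈ (PySem.Dict.mk pm).items ∧ p ≠ -1 ∧
       PySem.Dict.contains (PySem.Dict.mk vtc) p = true ∧
       PySem.Dict.contains (PySem.Dict.mk vtc) c = true ∧
       pvSyEdge vtc rd p c = true) := by
  unfold pvSyEdges
  constructor
  · intro h
    obtain ⟨cp, hcp, heq⟩ := List.mem_map.mp h
    obtain ⟨hmem, hcond⟩ := List.mem_filter.mp hcp
    have h1 : cp.2 = p := congrArg Prod.fst heq
    have h2 : cp.1 = c := congrArg Prod.snd heq
    simp only [Bool.and_eq_true, bne_iff_ne] at hcond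
    refine ⟨?_, ?_, ?_, ?_, ?_⟩
    · rw [← h1, ← h2]; exact hmem
    · rw [← h1]; exact hcond.1.1.1
    · rw [← h1]; exact hcond.1.1.2
    · rw [← h2]; exact hcond.1.2
    · rw [← h1, ← h2]; exact hcond.2
  · rintro ⟨hmem, hp, hcp, hcc, hsy⟩
    refine List.mem_map.mpr ⟨(c, p), List.mem_filter.mpr ⟨hmem, ?_⟩, rfl⟩
    simp only [Bool.and_eq_true, bne_iff_ne]
    exact ⟨⟨⟨hp, hcp⟩, hcc⟩, hsy⟩

theorem pvSeeds_mem (T : List String) (vtc : List (Int × String)) (v : Int) :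
    v ∈ pvSeeds T vtc ↔ ∃ a, (v, a) ∈ (PySem.Dict.mk vtc).items ∧ a ∈ T := by
  unfold pvSeeds
  constructor
  · intro h
    obtain ⟨kv, hkv, heq⟩ := List.mem_map.mp h
    obtain ⟨hmem, hcond⟩ := List.mem_filter.mp hkv
    exact ⟨kv.2, by rw [← heq]; exact hmem, by simpa [List.contains_iff_mem] using hcond⟩
  · rintro ⟨a, hmem, ha⟩
    exact List.mem_map.mpr ⟨(v, a), List.mem_filter.mpr ⟨hmem, by simpa [List.contains_iff_mem] using ha⟩, rfl⟩

-- A's walk result coincides with the least fixpoint: walk-true implies pvReach …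
theorem pvWalk_to_reach (T : List String) (vtc : List (Int × String)) (pm : List (Int × Int)) (rd : List (String × String × List String)) :
    ∀ (n : Nat) (v : Int), pvWalkOK T vtc pm rd n v = true → pvReachA T vtc pm rd n v = true →
      pvReach (pvSeeds T vtc) (pvSyEdges vtc pm rd) v := by
  intro n
  induction n with
  | zero => intro v _ hr; simp [pvReachA] at hr
  | succ n ih =>
    intro v hw hr
    simp only [pvWalkOK, Bool.and_eq_true] at hw
    obtain ⟨hcv, hw2⟩ := hw
    by_cases ht : PySem.Dict.getD (PySem.Dict.mk vtc) v "" ∈ T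
    · have hg : PySem.Dict.get? (PySem.Dict.mk vtc) v = some (PySem.Dict.getD (PySem.Dict.mk vtc) v "") := by
        have hs : (PySem.Dict.get? (PySem.Dict.mk vtc) v).isSome = true := by
          rw [← PySem.Dict.contains_eq_isSome_get?]; exact hcv
        cases hgg : PySem.Dict.get? (PySem.Dict.mk vtc) v with
        | none => rw [hgg] at hs; simp at hs
        | some w => rw [PySem.Dict.getD_eq_get?_getD, hgg]; rfl
      exact pvReach.base ((pvSeeds_mem T vtc v).mpr
        ⟨_, PySem.Dict.mem_items_of_get?_eq_some _ hg, ht⟩)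
    · simp only [pvReachA, if_neg ht] at hr
      by_cases hstop : PySem.Dict.getD (PySem.Dict.mk pm) v (-1) = -1 ∨
          "SY" ∉ pvEdgeRels vtc rd (PySem.Dict.getD (PySem.Dict.mk pm) v (-1)) v
      · rw [if_pos hstop] at hr; exact absurd hr (by simp)
      · rw [if_neg hstop] at hr
        push Not at hstop
        obtain ⟨hp1, hp2⟩ := hstop
        rw [if_neg ht, if_neg hp1, Bool.and_eq_true] at hw2
        obtain ⟨hcp, hw3⟩ := hw2
        rw [if_pos hp2] at hw3
        have hreachp := ih _ hw3 hr
        refine pvReach.step hreachp ?_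
        rw [pvSyEdges_mem]
        have hgp : PySem.Dict.get? (PySem.Dict.mk pm) v = some (PySem.Dict.getD (PySem.Dict.mk pm) v (-1)) := by
          cases hgg : PySem.Dict.get? (PySem.Dict.mk pm) v with
          | none =>
            rw [PySem.Dict.getD_eq_get?_getD, hgg] at hp1
            exact absurd rfl hp1
          | some w => rw [PySem.Dict.getD_eq_get?_getD, hgg]; rfl
        refine ⟨PySem.Dict.mem_items_of_get?_eq_some _ hgp, hp1, hcp, hcv, ?_⟩
        rw [pvSyEdge_eq]
        simpa [List.contains_iff_mem] using hp2

-- … and pvReach implies walk-true wherever the walk is defined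
theorem pvReach_to_walk (T : List String) (vtc : List (Int × String)) (pm : List (Int × Int)) (rd : List (String × String × List String))
    (hndv : (vtc.map Prod.fst).Nodup) (hndp : (pm.map Prod.fst).Nodup) :
    ∀ v, pvReach (pvSeeds T vtc) (pvSyEdges vtc pm rd) v →
      ∀ n, pvWalkOK T vtc pm rd n v = true → pvReachA T vtc pm rd n v = true := by
  have hkv : (PySem.Dict.mk vtc).keys.Nodup := by simpa [PySem.Dict.keys_mk] using hndv
  have hkp : (PySem.Dict.mk pm).keys.Nodup := by simpa [PySem.Dict.keys_mk] using hndp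
  intro v h
  induction h with
  | base hb =>
    intro n hw
    obtain ⟨a, hmem, ha⟩ := (pvSeeds_mem T vtc _).mp hb
    cases n with
    | zero => simp [pvWalkOK] at hw
    | succ n =>
      have hget : PySem.Dict.getD (PySem.Dict.mk vtc) _ "" = a :=
        PySem.Dict.getD_of_mem_items _ hmem hkv ""
      simp only [pvReachA]
      rw [if_pos (hget ▸ ha)]
  | @step p c _ he ih =>
    intro n hw
    obtain ⟨hmemp, hp1, hcp, hcc, hsy⟩ := (pvSyEdges_mem vtc pm rd p c).mp he
    cases n with
    | zero => simp [pvWalkOK] at hw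
    | succ n =>
      by_cases ht : PySem.Dict.getD (PySem.Dict.mk vtc) c "" ∈ T
      · simp only [pvReachA]; rw [if_pos ht]
      · have hgetp : PySem.Dict.getD (PySem.Dict.mk pm) c (-1) = p :=
          PySem.Dict.getD_of_mem_items _ hmemp hkp (-1)
        have hsy' : "SY" ∈ pvEdgeRels vtc rd p c := by
          rw [pvSyEdge_eq] at hsy
          simpa [List.contains_iff_mem] using hsy
        simp only [pvWalkOK, Bool.and_eq_true] at hw
        obtain ⟨_, hw2⟩ := hw
        rw [if_neg ht, hgetp, if_neg hp1, Bool.and_eq_true] at hw2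
        obtain ⟨_, hw3⟩ := hw2
        rw [if_pos hsy'] at hw3
        simp only [pvReachA]
        rw [if_neg ht, hgetp, if_neg (by push Not; exact ⟨hp1, hsy'⟩)]
        exact ih n hw3

-- the per-reference test of B equals the per-reference test of A wherever the walk is defined
theorem pvCond_eq (T : List String) (vtc : List (Int × String)) (pm : List (Int × Int)) (rd : List (String × String × List String))
    (hndv : (vtc.map Prod.fst).Nodup) (hndp : (pm.map Prod.fst).Nodup) (vid : Int)
    (hw : pvWalkOK T vtc pm rd (pm.length + 2) vid = true) :
    (pvFix (pvSyEdges vtc pm rd) (PySem.Dict.mk pm).size (pvSeeds T vtc)).contains vid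
      = pvReachA T vtc pm rd (pm.length + 2) vid := by
  set edges := pvSyEdges vtc pm rd with hedges
  set seeds := pvSeeds T vtc with hseeds
  set R := pvFix edges (PySem.Dict.mk pm).size seeds with hR
  have hmu : pvMu edges seeds ≤ (PySem.Dict.mk pm).size := by
    have h1 : pvMu edges seeds ≤ ((edges.map Prod.snd).dedup).length := List.length_filter_le _ _
    have h2 : ((edges.map Prod.snd).dedup).length ≤ (edges.map Prod.snd).length :=
      (List.dedup_sublist _).length_le
    have h3 : (edges.map Prod.snd).length = edges.length := List.length_map _
    have h4 : edges.length ≤ (PySem.Dict.mk pm).items.length := by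
      rw [hedges]
      unfold pvSyEdges
      rw [List.length_map]
      exact List.length_filter_le _ _
    have h5 : (PySem.Dict.mk pm).items.length = (PySem.Dict.mk pm).size := rfl
    omega
  have hclosed := pvFix_closed edges (PySem.Dict.mk pm).size seeds hmu
  have hsub := pvFix_sub edges (PySem.Dict.mk pm).size seeds
  cases hra : pvReachA T vtc pm rd (pm.length + 2) vid with
  | true =>
    have hreach := pvWalk_to_reach T vtc pm rd (pm.length + 2) vid hw hra
    have : vid ∈ R := pvReach_mem seeds edges R hclosed hsub vid hreach
    simpa [List.contains_iff_mem] using this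
  | false =>
    by_contra hc
    have hc' : vid ∈ R := by
      have : R.contains vid = true := by revert hc; cases R.contains vid <;> simp
      simpa [List.contains_iff_mem] using this
    have hreach := pvFix_sound seeds edges (PySem.Dict.mk pm).size seeds
      (fun v hv => pvReach.base hv) vid hc'
    have := pvReach_to_walk T vtc pm rd hndv hndp vid hreach (pm.length + 2) hw
    rw [hra] at this
    exact Bool.false_eq_true.mp this

theorem pvAdd_update_comm (T a : List String) (c : String) :
    PySem.Set.add (PySem.Set.update T a) c = PySem.Set.update T (PySem.Set.add a c) := by
  by_cases hc : c ∈ a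
  · rw [PySem.Set.add_of_mem hc, PySem.Set.add_of_mem ((PySem.Set.mem_update (y := c) (s := T) (xs := a)).mpr (Or.inr hc))]
  · rw [PySem.Set.add_of_not_mem hc, PySem.Set.update_append, PySem.Set.update_cons,
      PySem.Set.update_nil]

-- the two result-building folds agree when the per-reference tests agree
theorem pvFold_eq (T : List String) (c2v : List (String × Int)) (R : List Int)
    (condA : Int → Bool) :
    ∀ (l : List String) (acc : List String),
      (∀ cui ∈ l, ∀ vid, PySem.Dict.get? (PySem.Dict.mk c2v) cui = some vid → R.contains vid = condA vid) →
      (l.foldl (fun res cui =>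
          match PySem.Dict.get? (PySem.Dict.mk c2v) cui with
          | some vid => if R.contains vid then PySem.Set.add res cui else res
          | none => res) (PySem.Set.update T acc))
      = PySem.Set.update T (l.foldl (fun acc cui =>
          match PySem.Dict.get? (PySem.Dict.mk c2v) cui with
          | some vid => if condA vid = true then PySem.Set.add acc cui else acc
          | none => acc) acc) := by
  intro l
  induction l with
  | nil => intro acc _; simp
  | cons cui rest ih =>
    intro acc hcond
    have hrest : ∀ c ∈ rest, ∀ vid, PySem.Dict.get? (PySem.Dict.mk c2v) c = some vid → R.contains vid = condA vid :=
      fun c hc => hcond c (List.mem_cons_of_mem _ hc)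
    simp only [List.foldl_cons]
    cases hg : PySem.Dict.get? (PySem.Dict.mk c2v) cui with
    | none => exact ih acc hrest
    | some vid =>
      simp only [hg]
      rw [hcond cui List.mem_cons_self vid hg]
      by_cases hc : condA vid = true
      · rw [if_pos hc, if_pos hc, pvAdd_update_comm]
        exact ih (PySem.Set.add acc cui) hrest
      · rw [if_neg hc, if_neg hc]
        exact ih acc hrest

-- ===== VERDICT (by name: the statement is the Claim_ definition above) =====
theorem add_synonyms_spec : Claim_equal_add_synonyms := by
  intro ref T c2v vtc pm rd _hdom hpre
  unfold Spec_add_synonyms add_synonyms add_synonyms_alt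
  obtain ⟨hndT, hndv, hndp, hall⟩ := hpre
  by_cases href : ref = []
  · simp [href]
  · rw [if_neg href, if_neg href]
    have hofl : PySem.Set.ofList T = T := PySem.Set.ofList_eq_self_of_nodup T hndT
    have hcond : ∀ cui ∈ ref, ∀ vid, PySem.Dict.get? (PySem.Dict.mk c2v) cui = some vid →
        (pvFix (pvSyEdges vtc pm rd) (PySem.Dict.mk pm).size (pvSeeds T vtc)).contains vid
          = pvReachA T vtc pm rd (pm.length + 2) vid := by
      intro cui hcui vid hg
      have hok := List.all_eq_true.mp hall cui hcui
      unfold pvRefOK at hok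
      rw [hg] at hok
      exact pvCond_eq T vtc pm rd hndv hndp vid hok
    have hfe := pvFold_eq T c2v
      (pvFix (pvSyEdges vtc pm rd) (PySem.Dict.mk pm).size (pvSeeds T vtc))
      (pvReachA T vtc pm rd (pm.length + 2)) ref [] hcond
    rw [hofl]
    exact hfe.symm
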